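-- pv_equiv track=rewrite | github.com/beejak/Argus | hf_bundle_scanner/hf_bundle_scanner/report.py | compute_aggregate_exit
-- ===== SOURCE A (Python) =====
-- def compute_aggregate_exit(file_codes: list[int]) -> int:
--     """Priority: any 4 (usage) > 2 (driver) > 1 (policy/findings) > 0."""
--     if any(c == 4 for c in file_codes):
--         return 4
--     if any(c == 2 for c in file_codes):
--         return 2
--     if any(c == 1 for c in file_codes):
--         return 1
--     return 0
-- ===== SOURCE B (Python) =====
-- def compute_aggregate_exit(file_codes: list[int]) -> int:
--     """Priority: any 4 (usage) > 2 (driver) > 1 (policy/findings) > 0."""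
--     best = 0
--     for c in file_codes:
--         if c == 4:
--             return 4
--         if c == 2:
--             best = 2
--         elif c == 1 and best == 0:
--             best = 1
--     return best
-- ===== Notes on version B (the rewrite author's own statement) =====
-- stated objective: faster
-- what changed: Replaced the three independent any() scans with a single pass that maintains the highest priority seen (early return on 4, upgrade best on 2, set best on 1 only if unseen), ignoring all other codes.
import Mathlib
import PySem

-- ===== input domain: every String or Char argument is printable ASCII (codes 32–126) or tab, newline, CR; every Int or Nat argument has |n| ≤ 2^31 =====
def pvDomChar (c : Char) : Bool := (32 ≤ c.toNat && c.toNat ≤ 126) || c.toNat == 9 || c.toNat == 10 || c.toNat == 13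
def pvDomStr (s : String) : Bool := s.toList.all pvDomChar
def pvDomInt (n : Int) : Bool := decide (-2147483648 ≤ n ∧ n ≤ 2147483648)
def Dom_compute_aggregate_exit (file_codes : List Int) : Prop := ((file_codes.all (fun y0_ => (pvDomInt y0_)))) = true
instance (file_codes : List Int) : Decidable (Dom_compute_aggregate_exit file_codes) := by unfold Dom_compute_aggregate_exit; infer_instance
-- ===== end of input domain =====

-- B replaces A's three any() scans with one pass keeping the best priority seen; objective: alternative (same cost).

-- ===== PORT A =====
def compute_aggregate_exit (file_codes : List Int) : Int :=
  if file_codes.any (fun c => c == 4) then 4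
  else if file_codes.any (fun c => c == 2) then 2
  else if file_codes.any (fun c => c == 1) then 1
  else 0

-- ===== PORT B =====
-- single-pass loop with early return on 4, carried accumulator `best`
def compute_aggregate_exit_alt_go (best : Int) : List Int → Int
  | [] => best
  | c :: rest =>
    if c == 4 then 4
    else if c == 2 then compute_aggregate_exit_alt_go 2 rest
    else if c == 1 && best == 0 then compute_aggregate_exit_alt_go 1 rest
    else compute_aggregate_exit_alt_go best rest

def compute_aggregate_exit_alt (file_codes : List Int) : Int :=
  compute_aggregate_exit_alt_go 0 file_codes

-- ===== PRECONDITION & SPEC =====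
def Spec_compute_aggregate_exit (file_codes : List Int) (out : Int) : Prop := out = compute_aggregate_exit_alt file_codes
instance (file_codes : List Int) (out : Int) : Decidable (Spec_compute_aggregate_exit file_codes out) := by unfold Spec_compute_aggregate_exit; infer_instance

-- ===== CLAIM (what is proved, stated in full; the proofs are below) =====
def Claim_equal_compute_aggregate_exit : Prop := ∀ (file_codes : List Int), Dom_compute_aggregate_exit file_codes → Spec_compute_aggregate_exit file_codes (compute_aggregate_exit file_codes)

-- ===== LEMMAS AND PROOFS =====

-- invariant: for best ∈ {0,1,2}, the loop returns 4/2 if present, else max best (1 if present else 0)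
theorem compute_aggregate_exit_alt_go_eq (l : List Int) (best : Int)
    (hb : best = 0 ∨ best = 1 ∨ best = 2) :
    compute_aggregate_exit_alt_go best l =
      if l.any (fun c => c == 4) then 4
      else if l.any (fun c => c == 2) then 2
      else max best (if l.any (fun c => c == 1) then 1 else 0) := by
  induction l generalizing best with
  | nil =>
    simp [compute_aggregate_exit_alt_go]
    omega
  | cons c rest ih =>
    simp only [compute_aggregate_exit_alt_go, List.any_cons]
    by_cases h4 : c = 4
    · simp [h4]
    · by_cases h2 : c = 2
      · subst h2
        rw [ih 2 (by omega)]
        simp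
        split_ifs <;> omega
      · by_cases h1 : c = 1
        · subst h1
          by_cases hb0 : best = 0
          · subst hb0
            rw [if_neg (by decide), if_neg (by decide), if_pos (by decide),
                ih 1 (by omega)]
            simp only [Int.reduceBEq, Bool.false_or, Bool.true_or]
            split_ifs <;> simp_all
          · rw [if_neg (by decide), if_neg (by decide),
                if_neg (by simp [hb0]), ih best hb]
            simp only [Int.reduceBEq, Bool.false_or, Bool.true_or]
            split_ifs <;> simp_all <;> omega
        · rw [if_neg (by simp [h4]), if_neg (by simp [h2]),
              if_neg (by simp [h1]), ih best hb]
          simp [h4, h2, h1]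

-- ===== VERDICT (by name: the statement is the Claim_ definition above) =====
theorem compute_aggregate_exit_spec : Claim_equal_compute_aggregate_exit := by
  intro l _
  show compute_aggregate_exit l = compute_aggregate_exit_alt l
  rw [compute_aggregate_exit_alt, compute_aggregate_exit_alt_go_eq l 0 (by omega),
      compute_aggregate_exit]
  split_ifs <;> omega
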